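-- pv_equiv track=rewrite | github.com/maboudi/capachinos | src/eeg_analysis/visualization/plots.py | generate_region_acronyms
-- ===== SOURCE A (Python) =====
-- def generate_region_acronyms(region_names):
--     """
--     Generates a dictionary of acronyms for given region names.
--
--     Args:
--         region_names (list of str): List of full region names (e.g., ['frontal', 'prefrontal']).
--
--     Returns:
--         dict: A dictionary mapping full region names to their acronyms.
--     """
--     if isinstance(region_names, str):
--         region_names = [region_names]
--
--     acronyms = {}
--     for name in region_names:
--         if name.startswith('prefrontal'):
--             acronyms[name] = 'PF'
--         elif name.startswith('frontal'):
--             acronyms[name] = 'F'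
--         elif name.startswith('central'):
--             acronyms[name] = 'C'
--         elif name.startswith('temporal'):
--             acronyms[name] = 'T'
--         elif name.startswith('occipital'):
--             acronyms[name] = 'O'
--         elif name.startswith('parietal'):
--             acronyms[name] = 'P'
--         else:
--             acronyms[name] = name[:2].upper()  # Fallback: Use the first two letters as a default
--     return acronyms
-- ===== SOURCE B (Python) =====
-- _TABLE = [
--     ('prefrontal', 'PF'),
--     ('frontal', 'F'),
--     ('central', 'C'),
--     ('temporal', 'T'),
--     ('occipital', 'O'),
--     ('parietal', 'P'),
-- ]
--
--
-- def generate_region_acronyms(region_names):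
--     if isinstance(region_names, str):
--         region_names = [region_names]
--     # phase 1: every name gets the fallback acronym
--     acronyms = {name: name[:2].upper() for name in region_names}
--     # phase 2: prefix-major correction passes (the six prefixes are pairwise
--     # non-overlapping, so at most one pass rewrites a given name)
--     for prefix, ac in _TABLE:
--         for name in acronyms:
--             if name.startswith(prefix):
--                 acronyms[name] = ac
--     return acronyms
-- ===== Notes on version B (the rewrite author's own statement) =====
-- stated objective: alternative
-- what changed: Instead of classifying each name with an if/elif prefix chain in one pass, B first builds the whole dict with the name[:2].upper() fallback via a dict comprehension and then runs six prefix-major correction passes that overwrite matching entries in place, relying on the prefixes being pairwise non-overlapping.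
import Mathlib
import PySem

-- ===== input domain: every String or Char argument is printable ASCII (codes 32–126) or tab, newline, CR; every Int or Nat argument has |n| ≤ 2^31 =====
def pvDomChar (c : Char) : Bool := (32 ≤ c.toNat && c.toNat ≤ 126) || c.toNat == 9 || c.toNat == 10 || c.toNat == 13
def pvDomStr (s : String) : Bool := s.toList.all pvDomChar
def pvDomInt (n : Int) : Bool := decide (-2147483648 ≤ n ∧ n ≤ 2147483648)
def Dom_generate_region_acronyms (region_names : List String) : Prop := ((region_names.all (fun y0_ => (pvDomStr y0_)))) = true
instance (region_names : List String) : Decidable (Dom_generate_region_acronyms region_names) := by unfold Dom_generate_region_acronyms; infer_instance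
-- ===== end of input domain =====

-- B replaces A's per-name if/elif classification by two phases: fill the dict with the
-- fallback value for every name, then run six prefix-major correction passes that
-- overwrite matching entries in place (same cost; the prefixes are pairwise non-overlapping).

-- ===== PORT A =====
-- A's if/elif chain, foldl-ing dict inserts over the names.
def generate_region_acronyms (region_names : List String) : List (String × String) :=
  (region_names.foldl (fun (acronyms : PySem.Dict String String) name =>
      if PySem.Str.startswith name "prefrontal" then acronyms.insert name "PF"
      else if PySem.Str.startswith name "frontal" then acronyms.insert name "F"
      else if PySem.Str.startswith name "central" then acronyms.insert name "C"
      else if PySem.Str.startswith name "temporal" then acronyms.insert name "T"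
      else if PySem.Str.startswith name "occipital" then acronyms.insert name "O"
      else if PySem.Str.startswith name "parietal" then acronyms.insert name "P"
      else acronyms.insert name (PySem.Str.upper (PySem.Str.slice name none (some 2))))
    PySem.Dict.empty).items

-- ===== PORT B =====
-- the ordered (prefix, acronym) table of Source B
def pvTable : List (String × String) :=
  [("prefrontal", "PF"), ("frontal", "F"), ("central", "C"),
   ("temporal", "T"), ("occipital", "O"), ("parietal", "P")]

-- phase 1: {name: name[:2].upper() for name in region_names}; phase 2: for each (prefix, ac)
-- in the table, overwrite the entry of every name (dict keys; the passes never add or remove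
-- keys, so iterating the key list is exact for Python's 'for name in acronyms') that starts
-- with the prefix.
def generate_region_acronyms_alt (region_names : List String) : List (String × String) :=
  (pvTable.foldl
      (fun (acronyms : PySem.Dict String String) pa =>
        acronyms.keys.foldl
          (fun (d : PySem.Dict String String) name =>
            if PySem.Str.startswith name pa.1 then d.insert name pa.2 else d) acronyms)
      (region_names.foldl
        (fun (d : PySem.Dict String String) name =>
          d.insert name (PySem.Str.upper (PySem.Str.slice name none (some 2))))
        PySem.Dict.empty)).items

-- ===== PRECONDITION & SPEC =====
def Spec_generate_region_acronyms (region_names : List String) (out : List (String × String)) : Prop := out = generate_region_acronyms_alt region_names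
instance (region_names : List String) (out : List (String × String)) : Decidable (Spec_generate_region_acronyms region_names out) := by unfold Spec_generate_region_acronyms; infer_instance

-- ===== CLAIM (what is proved, stated in full; the proofs are below) =====
def Claim_equal_generate_region_acronyms : Prop := ∀ (region_names : List String), Dom_generate_region_acronyms region_names → Spec_generate_region_acronyms region_names (generate_region_acronyms region_names)

-- ===== LEMMAS AND PROOFS =====

-- the fallback value name[:2].upper()
def pvFb (name : String) : String := PySem.Str.upper (PySem.Str.slice name none (some 2))

-- the value A's if/elif chain assigns to a name
def pvVal (name : String) : String :=
  if PySem.Str.startswith name "prefrontal" then "PF"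
  else if PySem.Str.startswith name "frontal" then "F"
  else if PySem.Str.startswith name "central" then "C"
  else if PySem.Str.startswith name "temporal" then "T"
  else if PySem.Str.startswith name "occipital" then "O"
  else if PySem.Str.startswith name "parietal" then "P"
  else pvFb name

-- A's fold step is "insert name (pvVal name)"
theorem pv_A_eq (rs : List String) :
    generate_region_acronyms rs =
      (rs.foldl (fun (d : PySem.Dict String String) n => d.insert n (pvVal n))
        PySem.Dict.empty).items := by
  unfold generate_region_acronyms
  congr 1
  apply PySem.List.foldl_congr_mem
  intro d n _
  unfold pvVal pvFb
  split_ifs <;> rfl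

-- a correction pass over a Nodup key list contained in d's keys rewrites exactly the
-- matching entries of d.items
theorem pv_pass_items (P : String → Bool) (a : String) :
    ∀ (ks : List String) (d : PySem.Dict String String), ks.Nodup →
      (∀ k ∈ ks, k ∈ d.keys) →
      (ks.foldl (fun (d' : PySem.Dict String String) n =>
          if P n then d'.insert n a else d') d).items
        = d.items.map (fun p => if p.1 ∈ ks ∧ P p.1 then (p.1, a) else p) := by
  intro ks
  induction ks with
  | nil => intro d _ _; simp
  | cons k ks ih =>
    intro d hnd hsub
    obtain ⟨hkmem, hnd'⟩ := List.nodup_cons.mp hnd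
    have hc : d.contains k = true := by
      rw [PySem.Dict.contains_eq_decide_mem_keys]
      simp [hsub k (by simp)]
    simp only [List.foldl_cons]
    by_cases hPk : P k = true
    · rw [if_pos hPk]
      rw [ih (d.insert k a) hnd'
          (by intro k' hk'; rw [PySem.Dict.keys_insert_of_contains d a hc];
              exact hsub k' (by simp [hk']))]
      rw [PySem.Dict.items_insert_of_contains d a hc, List.map_map]
      apply List.map_congr_left
      intro p _
      by_cases hpk : p.1 = k
      · simp [Function.comp, hpk, hkmem, hPk]
      · simp [Function.comp, hpk, List.mem_cons]
    · rw [if_neg (by simp [hPk])]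
      rw [ih d hnd' (fun k' hk' => hsub k' (by simp [hk']))]
      apply List.map_congr_left
      intro p _
      by_cases hpk : p.1 = k
      · simp [hpk, hPk]
      · simp [hpk, List.mem_cons]

-- a full pass over d.keys rewrites exactly the matching entries
theorem pv_pass_full (P : String → Bool) (a : String) (d : PySem.Dict String String)
    (hnd : d.keys.Nodup) :
    (d.keys.foldl (fun (d' : PySem.Dict String String) n =>
        if P n then d'.insert n a else d') d).items
      = d.items.map (fun p => if P p.1 then (p.1, a) else p) := by
  rw [pv_pass_items P a d.keys d hnd (fun _ h => h)]
  apply List.map_congr_left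
  intro p hp
  simp [PySem.Dict.mem_keys_of_mem_items d hp]

-- a pass keeps the key list (hence its Nodup-ness)
theorem pv_pass_keys (P : String → Bool) (a : String) (d : PySem.Dict String String)
    (hnd : d.keys.Nodup) :
    (d.keys.foldl (fun (d' : PySem.Dict String String) n =>
        if P n then d'.insert n a else d') d).keys = d.keys := by
  calc (d.keys.foldl (fun (d' : PySem.Dict String String) n =>
          if P n then d'.insert n a else d') d).keys
      = (d.keys.foldl (fun (d' : PySem.Dict String String) n =>
          if P n then d'.insert n a else d') d).items.map (·.1) := rfl
    _ = (d.items.map (fun p => if P p.1 then (p.1, a) else p)).map (·.1) := by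
          rw [pv_pass_full P a d hnd]
    _ = d.items.map (·.1) := by
          rw [List.map_map]
          apply List.map_congr_left
          intro p _
          by_cases h : P p.1 = true <;> simp [Function.comp, h]
    _ = d.keys := rfl

-- the fallback fold paired with A's fold: A's items are B's phase-1 items with each
-- value replaced by pvVal of the key
theorem pv_pair (rs : List String) :
    ∀ (dA dB : PySem.Dict String String),
      dA.items = dB.items.map (fun p => (p.1, pvVal p.1)) →
      (rs.foldl (fun (d : PySem.Dict String String) n => d.insert n (pvVal n)) dA).items
        = (rs.foldl (fun (d : PySem.Dict String String) n => d.insert n (pvFb n)) dB).items.map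
            (fun p => (p.1, pvVal p.1)) := by
  induction rs with
  | nil => intro dA dB h; simpa using h
  | cons n rs ih =>
    intro dA dB h
    have hk : dA.keys = dB.keys := by
      simp only [PySem.Dict.keys, h, List.map_map]
      apply List.map_congr_left
      intro p _; rfl
    have hc : dA.contains n = dB.contains n := by
      rw [PySem.Dict.contains_eq_decide_mem_keys, PySem.Dict.contains_eq_decide_mem_keys, hk]
    simp only [List.foldl_cons]
    by_cases hcb : dB.contains n = true
    · apply ih
      rw [PySem.Dict.items_insert_of_contains dA (pvVal n) (hc.trans hcb),
          PySem.Dict.items_insert_of_contains dB (pvFb n) hcb, h,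
          List.map_map, List.map_map]
      apply List.map_congr_left
      intro p _
      by_cases hpn : p.1 = n
      · simp [Function.comp, hpn]
      · simp [Function.comp, hpn]
    · apply ih
      rw [PySem.Dict.items_insert_of_not_contains dA (pvVal n)
            (by rw [hc]; simpa using hcb),
          PySem.Dict.items_insert_of_not_contains dB (pvFb n) (by simpa using hcb), h,
          List.map_append]
      rfl

-- every entry of the phase-1 dict carries the fallback value of its key
theorem pv_fb_items (rs : List String) :
    ∀ (d : PySem.Dict String String), (∀ p ∈ d.items, p.2 = pvFb p.1) →
      ∀ p ∈ (rs.foldl (fun (d : PySem.Dict String String) n =>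
          d.insert n (pvFb n)) d).items, p.2 = pvFb p.1 := by
  induction rs with
  | nil => intro d h; simpa using h
  | cons n rs ih =>
    intro d h
    simp only [List.foldl_cons]
    apply ih
    intro p hp
    rcases (PySem.Dict.mem_items_insert d n (pvFb n) p).mp hp with h1 | h2
    · rw [h1]
    · exact h p h2.1

-- two of the six prefixes never both match the same name
theorem pv_excl {s : String} (p q : String)
    (h : PySem.Str.startswith s p = true)
    (hpq : ¬ (p.toList <+: q.toList)) (hqp : ¬ (q.toList <+: p.toList)) :
    PySem.Str.startswith s q = false := by
  rw [PySem.Str.startswith_eq] at h ⊢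
  rw [PySem.Chars.startswith_iff] at h
  by_contra hq
  rw [Bool.not_eq_false, PySem.Chars.startswith_iff] at hq
  rcases List.prefix_or_prefix_of_prefix h hq with h' | h'
  · exact hpq h'
  · exact hqp h'

-- the six correction passes, applied to an entry carrying the fallback value, produce
-- exactly the value of A's if/elif chain
-- the whole sequence of correction passes rewrites each entry by folding the table over it
theorem pv_passes (ps : List (String × String)) :
    ∀ (d : PySem.Dict String String), d.keys.Nodup →
      (ps.foldl
          (fun (acronyms : PySem.Dict String String) pa =>
            acronyms.keys.foldl
              (fun (d' : PySem.Dict String String) name =>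
                if PySem.Str.startswith name pa.1 then d'.insert name pa.2 else d') acronyms)
          d).items
        = d.items.map (fun p =>
            ps.foldl (fun (q : String × String) pa =>
              if PySem.Str.startswith q.1 pa.1 then (q.1, pa.2) else q) p) := by
  induction ps with
  | nil => intro d _; simp
  | cons pa ps ih =>
    intro d hnd
    simp only [List.foldl_cons]
    rw [ih (d.keys.foldl (fun (d' : PySem.Dict String String) n =>
          if PySem.Str.startswith n pa.1 then d'.insert n pa.2 else d') d)
        (by rw [pv_pass_keys (fun n => PySem.Str.startswith n pa.1) pa.2 d hnd]; exact hnd)]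
    rw [pv_pass_full (fun n => PySem.Str.startswith n pa.1) pa.2 d hnd, List.map_map]
    apply List.map_congr_left
    intro q _
    rfl

-- the table fold applied to an entry carrying the fallback value produces exactly the
-- value of A's if/elif chain
theorem pv_chain (p : String × String) (hp : p.2 = pvFb p.1) :
    pvTable.foldl (fun (q : String × String) pa =>
        if PySem.Str.startswith q.1 pa.1 then (q.1, pa.2) else q) p = (p.1, pvVal p.1) := by
  obtain ⟨s, t⟩ := p
  simp only at hp
  subst hp
  simp only [pvTable, List.foldl_cons, List.foldl_nil]
  by_cases c1 : PySem.Str.startswith s "prefrontal" = true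
  · have h2 := pv_excl "prefrontal" "frontal" c1 (by decide) (by decide)
    have h3 := pv_excl "prefrontal" "central" c1 (by decide) (by decide)
    have h4 := pv_excl "prefrontal" "temporal" c1 (by decide) (by decide)
    have h5 := pv_excl "prefrontal" "occipital" c1 (by decide) (by decide)
    have h6 := pv_excl "prefrontal" "parietal" c1 (by decide) (by decide)
    simp only [pvVal, c1, h2, h3, h4, h5, h6, if_true, Bool.false_eq_true, if_false]
  rw [Bool.not_eq_true] at c1
  by_cases c2 : PySem.Str.startswith s "frontal" = true
  · have h3 := pv_excl "frontal" "central" c2 (by decide) (by decide)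
    have h4 := pv_excl "frontal" "temporal" c2 (by decide) (by decide)
    have h5 := pv_excl "frontal" "occipital" c2 (by decide) (by decide)
    have h6 := pv_excl "frontal" "parietal" c2 (by decide) (by decide)
    simp only [pvVal, c1, c2, h3, h4, h5, h6, if_true, Bool.false_eq_true, if_false]
  rw [Bool.not_eq_true] at c2
  by_cases c3 : PySem.Str.startswith s "central" = true
  · have h4 := pv_excl "central" "temporal" c3 (by decide) (by decide)
    have h5 := pv_excl "central" "occipital" c3 (by decide) (by decide)
    have h6 := pv_excl "central" "parietal" c3 (by decide) (by decide)
    simp only [pvVal, c1, c2, c3, h4, h5, h6, if_true, Bool.false_eq_true, if_false]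
  rw [Bool.not_eq_true] at c3
  by_cases c4 : PySem.Str.startswith s "temporal" = true
  · have h5 := pv_excl "temporal" "occipital" c4 (by decide) (by decide)
    have h6 := pv_excl "temporal" "parietal" c4 (by decide) (by decide)
    simp only [pvVal, c1, c2, c3, c4, h5, h6, if_true, Bool.false_eq_true, if_false]
  rw [Bool.not_eq_true] at c4
  by_cases c5 : PySem.Str.startswith s "occipital" = true
  · have h6 := pv_excl "occipital" "parietal" c5 (by decide) (by decide)
    simp only [pvVal, c1, c2, c3, c4, c5, h6, if_true, Bool.false_eq_true, if_false]
  rw [Bool.not_eq_true] at c5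
  by_cases c6 : PySem.Str.startswith s "parietal" = true
  · simp only [pvVal, c1, c2, c3, c4, c5, c6, if_true, Bool.false_eq_true, if_false]
  rw [Bool.not_eq_true] at c6
  simp only [pvVal, c1, c2, c3, c4, c5, c6, Bool.false_eq_true, if_false]

theorem generate_region_acronyms_spec' (rs : List String) :
    generate_region_acronyms rs = generate_region_acronyms_alt rs := by
  have hd0 : ∀ p ∈ (rs.foldl (fun (d : PySem.Dict String String) n =>
      d.insert n (pvFb n)) PySem.Dict.empty).items, p.2 = pvFb p.1 :=
    pv_fb_items rs PySem.Dict.empty (by intro p hp; simp [PySem.Dict.empty] at hp)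
  have hnd0 : (rs.foldl (fun (d : PySem.Dict String String) n =>
      d.insert n (pvFb n)) PySem.Dict.empty).keys.Nodup :=
    PySem.Dict.nodup_keys_foldl_insert rs (fun _ n => pvFb n) PySem.Dict.empty
      (by simp [PySem.Dict.keys_empty])
  rw [pv_A_eq]
  unfold generate_region_acronyms_alt
  have hfb : (rs.foldl (fun (d : PySem.Dict String String) name =>
      d.insert name (PySem.Str.upper (PySem.Str.slice name none (some 2)))) PySem.Dict.empty)
      = (rs.foldl (fun (d : PySem.Dict String String) n => d.insert n (pvFb n))
          PySem.Dict.empty) := rfl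
  rw [hfb]
  rw [pv_pair rs PySem.Dict.empty PySem.Dict.empty (by rfl)]
  rw [pv_passes pvTable _ hnd0]
  apply List.map_congr_left
  intro p hp
  exact (pv_chain p (hd0 p hp)).symm

-- ===== VERDICT (by name: the statement is the Claim_ definition above) =====
theorem generate_region_acronyms_spec : Claim_equal_generate_region_acronyms := by
  intro rs _
  exact generate_region_acronyms_spec' rs
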